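-- pv_equiv track=rewrite | github.com/A1pha3/ai-hedge-fund | scripts/analyze_btst_candidate_pool_recall_dossier.py | _count_stages
-- ===== SOURCE A (Python) =====
-- from collections import Counter
-- from typing import Any
--
-- STAGE_ORDER = [
--     "shadow_snapshot_legacy_unknown",
--     "missing_market_context",
--     "missing_stock_basic",
--     "st_excluded",
--     "beijing_exchange_excluded",
--     "new_listing_excluded",
--     "suspended",
--     "limit_up_excluded",
--     "cooldown_excluded",
--     "low_estimated_liquidity",
--     "low_avg_amount_20d",
--     "candidate_pool_truncated_after_filters",
--     "candidate_pool_visible_or_later_stage",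
-- ]
--
-- def _count_stages(rows: list[dict[str, Any]], key: str = "blocking_stage") -> dict[str, int]:
--     counts = Counter(str(row.get(key) or "unknown") for row in rows if str(row.get(key) or "").strip())
--     ordered: dict[str, int] = {}
--     for stage in STAGE_ORDER:
--         if counts.get(stage):
--             ordered[stage] = int(counts[stage])
--     for stage, count in counts.most_common():
--         if stage not in ordered:
--             ordered[stage] = int(count)
--     return ordered
-- ===== SOURCE B (Python) =====
-- STAGE_ORDER = [
--     "shadow_snapshot_legacy_unknown",
--     "missing_market_context",
--     "missing_stock_basic",
--     "st_excluded",
--     "beijing_exchange_excluded",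
--     "new_listing_excluded",
--     "suspended",
--     "limit_up_excluded",
--     "cooldown_excluded",
--     "low_estimated_liquidity",
--     "low_avg_amount_20d",
--     "candidate_pool_truncated_after_filters",
--     "candidate_pool_visible_or_later_stage",
-- ]
--
--
-- def _count_stages(rows, key="blocking_stage"):
--     counts = {}
--     for row in rows:
--         raw = str(row.get(key) or "")
--         if raw.strip():
--             counts[raw] = counts.get(raw, 0) + 1
--     priority = {stage: i for i, stage in enumerate(STAGE_ORDER)}
--
--     def rank(entry):
--         pos, (stage, count) = entry
--         p = priority.get(stage)
--         if p is not None: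
--             return (0, p, 0)
--         return (1, -count, pos)
--
--     return {stage: count for _, (stage, count) in sorted(enumerate(counts.items()), key=rank)}
-- ===== Notes on version B (the rewrite author's own statement) =====
-- stated objective: alternative
-- what changed: Replaces A's two sequential ordering loops (a STAGE_ORDER scan plus a most_common() pass with membership skips) by a single stable sorted() over the enumerated count items using a composite key (0, priority, 0) for known stages and (1, -count, insertion rank) for the rest.
import Mathlib
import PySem

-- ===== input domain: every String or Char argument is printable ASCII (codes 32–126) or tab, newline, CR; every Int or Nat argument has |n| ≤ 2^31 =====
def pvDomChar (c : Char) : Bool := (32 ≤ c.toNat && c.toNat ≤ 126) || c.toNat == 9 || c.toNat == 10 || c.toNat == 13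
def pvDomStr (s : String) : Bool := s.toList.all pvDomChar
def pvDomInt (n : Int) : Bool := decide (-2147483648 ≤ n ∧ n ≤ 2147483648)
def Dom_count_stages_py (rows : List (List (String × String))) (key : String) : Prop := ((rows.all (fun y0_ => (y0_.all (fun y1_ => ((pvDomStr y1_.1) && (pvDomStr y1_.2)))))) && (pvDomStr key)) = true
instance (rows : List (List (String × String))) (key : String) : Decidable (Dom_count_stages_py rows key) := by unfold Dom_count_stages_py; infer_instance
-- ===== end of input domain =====

-- B replaces A's two ordering loops (STAGE_ORDER scan + most_common() pass with membership
-- skips) by ONE stable sort of the enumerated count items under a composite rank; same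
-- asymptotic cost, alternative decomposition. Return values proved equal on all of Dom.

-- ===== PORT A =====
def pvStageOrder : List String :=
  [ "shadow_snapshot_legacy_unknown"
  , "missing_market_context"
  , "missing_stock_basic"
  , "st_excluded"
  , "beijing_exchange_excluded"
  , "new_listing_excluded"
  , "suspended"
  , "limit_up_excluded"
  , "cooldown_excluded"
  , "low_estimated_liquidity"
  , "low_avg_amount_20d"
  , "candidate_pool_truncated_after_filters"
  , "candidate_pool_visible_or_later_stage" ]

def count_stages_py (rows : List (List (String × String))) (key : String) : List (String × Int) :=
  -- counts = Counter(str(row.get(key) or "unknown") for row in rows if str(row.get(key) or "").strip())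
  let vals : List String :=
    (rows.filter (fun row => PySem.Str.strip ((PySem.Dict.mk row).getD key "") ≠ "")).map
      (fun row =>
        let v := (PySem.Dict.mk row).getD key ""
        if v = "" then "unknown" else v)
  let counts := PySem.Dict.counter vals
  -- first loop: stages of STAGE_ORDER with a truthy count
  let ordered1 := pvStageOrder.foldl
    (fun (d : PySem.Dict String Int) stage =>
      if (counts.get? stage).getD 0 ≠ 0 then d.insert stage (counts.getD stage 0) else d)
    PySem.Dict.empty
  -- second loop: counts.most_common(), skipping stages already present
  let ordered2 := (PySem.List.sorted counts.items (fun p => p.2) true).foldl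
    (fun (d : PySem.Dict String Int) p => if d.contains p.1 then d else d.insert p.1 p.2)
    ordered1
  ordered2.items

-- ===== PORT B =====
-- priority = {stage: i for i, stage in enumerate(STAGE_ORDER)}
def pvPriority : PySem.Dict String Int :=
  (PySem.List.enumerate pvStageOrder).foldl (fun d e => d.insert e.2 e.1) PySem.Dict.empty

-- rank(entry): (0, priority[stage], 0) for known stages, else (1, -count, pos);
-- Python's lexicographic tuple comparison is the Lex order on nested pairs.
def pvRank (e : Int × (String × Int)) : Lex (Int × Lex (Int × Int)) :=
  match pvPriority.get? e.2.1 with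
  | some p => toLex (0, toLex (p, 0))
  | none   => toLex (1, toLex (-e.2.2, e.1))

def count_stages_py_alt (rows : List (List (String × String))) (key : String) : List (String × Int) :=
  let counts := rows.foldl
    (fun (d : PySem.Dict String Int) row =>
      let raw := (PySem.Dict.mk row).getD key ""
      if PySem.Str.strip raw ≠ "" then d.insert raw (d.getD raw 0 + 1) else d)
    PySem.Dict.empty
  let keyed := PySem.List.sorted (PySem.List.enumerate counts.items) pvRank false
  (keyed.foldl (fun (d : PySem.Dict String Int) e => d.insert e.2.1 e.2.2) PySem.Dict.empty).items

-- ===== PRECONDITION & SPEC =====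
def Spec_count_stages_py (rows : List (List (String × String))) (key : String) (out : List (String × Int)) : Prop := out = count_stages_py_alt rows key
instance (rows : List (List (String × String))) (key : String) (out : List (String × Int)) : Decidable (Spec_count_stages_py rows key out) := by unfold Spec_count_stages_py; infer_instance

-- ===== CLAIM (what is proved, stated in full; the proofs are below) =====
def Claim_equal_count_stages_py : Prop := ∀ (rows : List (List (String × String))) (key : String), Dom_count_stages_py rows key → Spec_count_stages_py rows key (count_stages_py rows key)

-- ===== LEMMAS AND PROOFS =====

-- Both ports count the same raw values of the filtered rows.
def pvVals (rows : List (List (String × String))) (key : String) : List String :=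
  (rows.filter (fun row => PySem.Str.strip ((PySem.Dict.mk row).getD key "") ≠ "")).map
    (fun row => (PySem.Dict.mk row).getD key "")

-- B's counting loop equals Counter(pvVals …)
lemma pv_counts_B (rows : List (List (String × String))) (key : String) :
    rows.foldl
      (fun (d : PySem.Dict String Int) row =>
        let raw := (PySem.Dict.mk row).getD key ""
        if PySem.Str.strip raw ≠ "" then d.insert raw (d.getD raw 0 + 1) else d)
      PySem.Dict.empty = PySem.Dict.counter (pvVals rows key) := by
  unfold pvVals
  show rows.foldl
      (fun (d : PySem.Dict String Int) row =>
        if PySem.Str.strip ((PySem.Dict.mk row).getD key "") ≠ "" then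
          d.insert ((PySem.Dict.mk row).getD key "")
            (d.getD ((PySem.Dict.mk row).getD key "") 0 + 1) else d)
      PySem.Dict.empty = _
  rw [PySem.List.foldl_ite_eq_foldl_filter
      (p := fun row => PySem.Str.strip ((PySem.Dict.mk row).getD key "") ≠ "")
      (f := fun (d : PySem.Dict String Int) row =>
        d.insert ((PySem.Dict.mk row).getD key "")
          (d.getD ((PySem.Dict.mk row).getD key "") 0 + 1))]
  rw [← PySem.Dict.foldl_insert_getD_add_one_eq_counter, List.foldl_map]

-- A's "or unknown" fallback is dead on filtered rows: the raw value is nonempty there.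
lemma pv_vals_A (rows : List (List (String × String))) (key : String) :
    (rows.filter (fun row => PySem.Str.strip ((PySem.Dict.mk row).getD key "") ≠ "")).map
      (fun row =>
        let v := (PySem.Dict.mk row).getD key ""
        if v = "" then "unknown" else v) = pvVals rows key := by
  apply List.map_congr_left
  intro row hr
  have h := (List.mem_filter.mp hr).2
  simp only [decide_eq_true_eq] at h
  have hv : (PySem.Dict.mk row).getD key "" ≠ "" := by
    intro he; rw [he] at h; exact h (by decide)
  simp only [if_neg hv]

-- A's second loop: a skip-or-insert fold over pairs with distinct keys appends the missing ones.
lemma pv_skip_fold (mc : List (String × Int)) (d : PySem.Dict String Int)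
    (hnd : (mc.map Prod.fst).Nodup) :
    (mc.foldl (fun d p => if d.contains p.1 then d else d.insert p.1 p.2) d).items
      = d.items ++ mc.filter (fun p => !d.contains p.1) := by
  induction mc generalizing d with
  | nil => simp
  | cons q rest ih =>
    simp only [List.map_cons, List.nodup_cons] at hnd
    by_cases h : d.contains q.1
    · simp only [List.foldl_cons, List.filter_cons, h, Bool.not_true, if_true, if_false,
        Bool.false_eq_true]
      rw [ih d hnd.2]
    · have hb : d.contains q.1 = false := by simp [h]
      simp only [List.foldl_cons, List.filter_cons, hb, Bool.not_false, if_true, if_false,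
        Bool.false_eq_true]
      rw [ih (d.insert q.1 q.2) hnd.2]
      rw [PySem.Dict.items_insert_of_not_contains _ _ hb]
      rw [List.filter_congr (l := rest) (q := fun p => !d.contains p.1) ?_]
      · simp
      · intro p hp
        have hne : p.1 ≠ q.1 := by
          intro he; exact hnd.1 (he ▸ List.mem_map_of_mem hp)
        rw [PySem.Dict.contains_insert]
        simp [hne]

-- while every index in the accumulator is below the inserted one, the index tiebreak never fires
lemma pv_insertBy_dec (x : Int × (String × Int)) (acc : List (Int × (String × Int)))
    (h : ∀ e ∈ acc, e.1 < x.1) :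
    (PySem.List.insertBy
        (fun a b => decide ((toLex (-a.2.2, a.1) : Lex (Int × Int)) < toLex (-b.2.2, b.1)))
        x acc).map Prod.snd
      = PySem.List.insertBy (fun a b => decide (b.2 < a.2)) x.2 (acc.map Prod.snd) := by
  induction acc with
  | nil => simp [PySem.List.insertBy]
  | cons y ys ih =>
    have hy : y.1 < x.1 := h y (by simp)
    have hcmp : (decide ((toLex (-x.2.2, x.1) : Lex (Int × Int)) < toLex (-y.2.2, y.1)))
        = decide (y.2.2 < x.2.2) := by
      rw [decide_eq_decide, Prod.Lex.toLex_lt_toLex]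
      constructor
      · rintro (hlt | ⟨_, hlt⟩)
        · omega
        · omega
      · intro hlt; left; omega
    simp only [PySem.List.insertBy, List.map_cons]
    simp only [hcmp]
    by_cases hc : y.2.2 < x.2.2
    · simp [hc]
    · simp only [hc, decide_false, Bool.false_eq_true, if_false, List.map_cons]
      rw [ih (fun e he => h e (by simp [he]))]

lemma pv_enum_idx_ge (l : List (String × Int)) :
    ∀ (n : Int), ∀ e ∈ PySem.List.enumerate l n, n ≤ e.1 := by
  induction l with
  | nil => intro n e he; simp [PySem.List.enumerate] at he
  | cons p t ih =>
    intro n e he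
    simp only [PySem.List.enumerate, List.mem_cons] at he
    rcases he with he | he
    · simp [he]
    · have := ih (n + 1) e he; omega

-- sorting the enumerated pairs by (-count, index) and dropping indices is exactly
-- the stable reverse sort by count (Counter.most_common)
lemma pv_sorted_dec_fold (l : List (String × Int)) :
    ∀ (n : Int) (acc : List (Int × (String × Int))),
    (∀ e ∈ acc, e.1 < n) →
    ((PySem.List.enumerate l n).foldl
        (fun acc x => PySem.List.insertBy
          (fun a b => decide ((toLex (-a.2.2, a.1) : Lex (Int × Int)) < toLex (-b.2.2, b.1)))
          x acc) acc).map Prod.snd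
      = l.foldl (fun acc x => PySem.List.insertBy (fun a b => decide (b.2 < a.2)) x acc)
          (acc.map Prod.snd) := by
  induction l with
  | nil => intro n acc h; rfl
  | cons p t ih =>
    intro n acc h
    simp only [PySem.List.enumerate, List.foldl_cons]
    rw [ih (n + 1) _ ?_]
    · rw [pv_insertBy_dec (n, p) acc h]
    · intro e he
      rcases (PySem.List.mem_insertBy _ _ _ _).mp he with rfl | he'
      · simp
      · have := h e he'; omega

lemma pv_sorted_dec (l : List (String × Int)) :
    (PySem.List.sorted (PySem.List.enumerate l)
        (fun e => (toLex (-e.2.2, e.1) : Lex (Int × Int))) false).map Prod.snd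
      = PySem.List.sorted l (fun p => p.2) true := by
  rw [PySem.List.sorted_eq_foldl_insertBy, PySem.List.sorted_rev_eq_foldl_insertBy]
  exact pv_sorted_dec_fold l 0 [] (by simp)

lemma pv_enum_len (l : List (String × Int)) : ∀ n, (PySem.List.enumerate l n).length = l.length := by
  induction l with
  | nil => intro n; rfl
  | cons p t ih => intro n; simp [PySem.List.enumerate, ih]

lemma pv_enum_get (l : List (String × Int)) : ∀ (n : Int) (i : Nat) (h : i < l.length),
    (PySem.List.enumerate l n)[i]'(by rw [pv_enum_len]; exact h) = (n + i, l[i]) := by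
  induction l with
  | nil => intro n i h; simp at h
  | cons p t ih =>
    intro n i h
    cases i with
    | zero => simp [PySem.List.enumerate]
    | succ j =>
      have hj : j < t.length := by simpa using h
      have := ih (n + 1) j hj
      simp only [PySem.List.enumerate, List.getElem_cons_succ, this, List.getElem_cons_succ]
      congr 1
      omega

-- enumerate over a list with distinct keys decorates each pair with the index of its key
lemma pv_enum_dec (l : List (String × Int)) (hnd : (l.map Prod.fst).Nodup) :
    PySem.List.enumerate l = l.map (fun p => (((l.map Prod.fst).idxOf p.1 : Int), p)) := by
  apply List.ext_getElem
  · rw [pv_enum_len]; simp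
  · intro i h1 h2
    have hi : i < l.length := by simpa using h2
    rw [pv_enum_get l 0 i hi]
    simp only [List.getElem_map]
    have : (l.map Prod.fst).idxOf l[i].1 = i := by
      have : l[i].1 = (l.map Prod.fst)[i]'(by simpa using hi) := by simp
      rw [this]
      exact hnd.idxOf_getElem _ _
    rw [this]
    simp

lemma pv_enum_idx_pairwise (l : List (String × Int)) :
    ∀ n, ((PySem.List.enumerate l n).map Prod.fst).Pairwise (· < ·) := by
  induction l with
  | nil => intro n; simp [PySem.List.enumerate]
  | cons p t ih =>
    intro n
    simp only [PySem.List.enumerate, List.map_cons, List.pairwise_cons]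
    refine ⟨?_, ih (n + 1)⟩
    intro i hi
    rcases List.mem_map.mp hi with ⟨e, he, rfl⟩
    have := pv_enum_idx_ge t (n + 1) e he
    omega

-- the priority table (closed computations)
lemma pv_prio_keys : pvPriority.keys = pvStageOrder := by decide
lemma pv_stage_nodup : pvStageOrder.Nodup := by decide
lemma pv_prio_pairwise :
    pvStageOrder.Pairwise (fun s t => pvPriority.getD s 0 < pvPriority.getD t 0) := by decide

lemma pv_prio_none (s : String) (h : s ∉ pvStageOrder) : pvPriority.get? s = none := by
  rw [PySem.Dict.get?_eq_none_iff_not_mem_keys, pv_prio_keys]; exact h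

lemma pv_prio_some (s : String) (h : s ∈ pvStageOrder) :
    pvPriority.get? s = some (pvPriority.getD s 0) := by
  have hc : pvPriority.contains s = true := by
    rw [PySem.Dict.contains_iff_mem_keys, pv_prio_keys]; exact h
  have : (pvPriority.get? s).isSome := by
    rw [PySem.Dict.contains_eq_isSome_get?] at hc; exact hc
  rcases Option.isSome_iff_exists.mp this with ⟨v, hv⟩
  rw [hv, PySem.Dict.getD_eq_get?_getD, hv]; rfl

lemma pv_rank_mem (e : Int × (String × Int)) (h : e.2.1 ∈ pvStageOrder) :
    pvRank e = toLex (0, toLex (pvPriority.getD e.2.1 0, 0)) := by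
  unfold pvRank; rw [pv_prio_some _ h]

lemma pv_rank_not_mem (e : Int × (String × Int)) (h : e.2.1 ∉ pvStageOrder) :
    pvRank e = toLex (1, toLex (-e.2.2, e.1)) := by
  unfold pvRank; rw [pv_prio_none _ h]

-- THE ordering lemma: the B sort equals "STAGE_ORDER members first, then the (-count, idx) sort of the rest"
lemma pv_keyed_eq (C : PySem.Dict String Int) (hk : C.keys.Nodup) :
    PySem.List.sorted (PySem.List.enumerate C.items) pvRank false
      = (pvStageOrder.filter (fun s => C.contains s)).map
          (fun s => (((C.items.map Prod.fst).idxOf s : Int), (s, C.getD s 0)))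
        ++ (PySem.List.sorted (PySem.List.enumerate C.items)
              (fun e => (toLex (-e.2.2, e.1) : Lex (Int × Int))) false).filter
             (fun e => !decide (e.2.1 ∈ pvStageOrder)) := by
  have hnd : (C.items.map Prod.fst).Nodup := hk
  set dec : (String × Int) → Int × (String × Int) :=
    fun p => (((C.items.map Prod.fst).idxOf p.1 : Int), p) with hdec
  set mcD := PySem.List.sorted (PySem.List.enumerate C.items)
      (fun e => (toLex (-e.2.2, e.1) : Lex (Int × Int))) false with hmcD
  set members := pvStageOrder.filter (fun s => C.contains s) with hmem
  set ys := members.map (fun s => dec (s, C.getD s 0))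
      ++ mcD.filter (fun e => !decide (e.2.1 ∈ pvStageOrder)) with hys
  have hED : PySem.List.enumerate C.items = C.items.map dec := pv_enum_dec _ hnd
  -- membership facts
  have hmemM : ∀ s, s ∈ members ↔ s ∈ pvStageOrder ∧ s ∈ C.keys := by
    intro s
    rw [hmem, List.mem_filter, PySem.Dict.contains_iff_mem_keys]
  -- permutation
  have hpermStr : members.Perm ((C.items.map Prod.fst).filter (fun s => decide (s ∈ pvStageOrder))) := by
    rw [List.perm_ext_iff_of_nodup (by exact (pv_stage_nodup.filter _)) (hnd.filter _)]
    intro s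
    rw [hmemM s, List.mem_filter, decide_eq_true_eq]
    have : C.keys = C.items.map Prod.fst := rfl
    rw [← this]; tauto
  -- split of items.map dec into members and the rest
  have h1 : (C.items.map dec).filter (fun e => decide (e.2.1 ∈ pvStageOrder))
      = (C.items.filter (fun p => decide (p.1 ∈ pvStageOrder))).map dec := by
    rw [List.filter_map]; rfl
  have h2 : C.items.filter (fun p => decide (p.1 ∈ pvStageOrder))
      = ((C.items.map Prod.fst).filter (fun s => decide (s ∈ pvStageOrder))).map
          (fun k => (k, C.getD k 0)) := by
    conv_lhs => rw [PySem.Dict.items_eq_map_keys C hk 0]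
    rw [List.filter_map]
    rfl
  have hM : (members.map (fun s => dec (s, C.getD s 0))).Perm
      ((C.items.map dec).filter (fun e => decide (e.2.1 ∈ pvStageOrder))) := by
    rw [h1, h2, List.map_map]
    exact hpermStr.map _
  have hE : (mcD.filter (fun e => !decide (e.2.1 ∈ pvStageOrder))).Perm
      ((C.items.map dec).filter (fun e => !decide (e.2.1 ∈ pvStageOrder))) := by
    have hp : mcD.Perm (C.items.map dec) := by
      rw [hmcD, ← hED]
      exact PySem.List.sorted_perm _ _ _
    exact hp.filter _
  have hPerm : ys.Perm (PySem.List.enumerate C.items) := by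
    rw [hys, hED]
    exact (hM.append hE).trans
      (List.filter_append_perm (fun e => decide (e.2.1 ∈ pvStageOrder)) (C.items.map dec))
  have hPW : ys.Pairwise (fun a b => pvRank a < pvRank b) := by
    rw [hys, List.pairwise_append]
    refine ⟨?_, ?_, ?_⟩
    · rw [List.pairwise_map]
      have h0 : members.Pairwise (fun s t => pvPriority.getD s 0 < pvPriority.getD t 0) := by
        rw [hmem]; exact pv_prio_pairwise.filter _
      apply h0.imp_of_mem
      intro s t hs ht hlt
      have hsS : s ∈ pvStageOrder := ((hmemM s).mp hs).1
      have htS : t ∈ pvStageOrder := ((hmemM t).mp ht).1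
      rw [pv_rank_mem _ hsS, pv_rank_mem _ htS]
      exact Prod.Lex.toLex_lt_toLex.mpr (Or.inr ⟨rfl, Prod.Lex.toLex_lt_toLex.mpr (Or.inl hlt)⟩)
    · have hle : mcD.Pairwise (fun a b =>
          (toLex (-a.2.2, a.1) : Lex (Int × Int)) ≤ toLex (-b.2.2, b.1)) := by
        rw [hmcD]
        exact PySem.List.sorted_pairwise _ _
      have hneidx : mcD.Pairwise (fun a b => a.1 ≠ b.1) := by
        have hA : ((PySem.List.enumerate C.items).map Prod.fst).Pairwise (· < ·) :=
          pv_enum_idx_pairwise _ 0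
        have hB : ((PySem.List.enumerate C.items).map Prod.fst).Nodup :=
          hA.imp (fun h => ne_of_lt h)
        have hC : (mcD.map Prod.fst).Nodup := by
          have hp : mcD.Perm (PySem.List.enumerate C.items) := by
            rw [hmcD]; exact PySem.List.sorted_perm _ _ _
          exact ((hp.map Prod.fst).nodup_iff).mpr hB
        exact List.pairwise_map.mp hC
      have hfil := (hle.and hneidx).filter (fun e => !decide (e.2.1 ∈ pvStageOrder))
      apply hfil.imp_of_mem
      intro a b ha hb hab
      have haS : a.2.1 ∉ pvStageOrder := by
        have := (List.mem_filter.mp ha).2; simpa using this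
      have hbS : b.2.1 ∉ pvStageOrder := by
        have := (List.mem_filter.mp hb).2; simpa using this
      rw [pv_rank_not_mem a haS, pv_rank_not_mem b hbS]
      refine Prod.Lex.toLex_lt_toLex.mpr (Or.inr ⟨rfl, lt_of_le_of_ne hab.1 ?_⟩)
      intro he
      exact hab.2 (congrArg (fun q => (ofLex q).2) he)
    · intro a ha b hb
      rcases List.mem_map.mp ha with ⟨s, hs, rfl⟩
      have hsS : s ∈ pvStageOrder := ((hmemM s).mp hs).1
      have hbS : b.2.1 ∉ pvStageOrder := by
        have := (List.mem_filter.mp hb).2; simpa using this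
      rw [pv_rank_mem _ hsS, pv_rank_not_mem b hbS]
      exact Prod.Lex.toLex_lt_toLex.mpr (Or.inl (by norm_num))
  exact PySem.List.sorted_eq_of_perm_of_pairwise_lt _ ys pvRank hPerm hPW

lemma pv_A_order (C : PySem.Dict String Int) (hk : C.keys.Nodup)
    (hcond : ∀ s, ((C.get? s).getD 0 ≠ 0) ↔ C.contains s = true) :
    ((PySem.List.sorted C.items (fun p => p.2) true).foldl
        (fun d p => if d.contains p.1 then d else d.insert p.1 p.2)
        (pvStageOrder.foldl
          (fun d s => if (C.get? s).getD 0 ≠ 0 then d.insert s (C.getD s 0) else d)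
          PySem.Dict.empty)).items
      = (pvStageOrder.filter (fun s => C.contains s)).map (fun s => (s, C.getD s 0))
        ++ (PySem.List.sorted C.items (fun p => p.2) true).filter
            (fun p => !decide (p.1 ∈ pvStageOrder)) := by
  set mc := PySem.List.sorted C.items (fun p => p.2) true with hmc
  set members := pvStageOrder.filter (fun s => C.contains s) with hmem
  -- first loop: condition is just containment
  have h1 : pvStageOrder.foldl
      (fun d s => if (C.get? s).getD 0 ≠ 0 then d.insert s (C.getD s 0) else d) PySem.Dict.empty
      = members.foldl (fun d s => d.insert s (C.getD s 0)) PySem.Dict.empty := by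
    have h1a := PySem.List.foldl_congr_mem (l := pvStageOrder) (init := (PySem.Dict.empty : PySem.Dict String Int))
      (f := fun d s => if (C.get? s).getD 0 ≠ 0 then d.insert s (C.getD s 0) else d)
      (g := fun d s => if C.contains s = true then d.insert s (C.getD s 0) else d) ?_
    · rw [h1a, hmem]
      exact PySem.List.foldl_if_eq_foldl_filter (fun s => C.contains s) _ _ _
    · intro acc s _
      by_cases hc : C.contains s = true
      · simp [(hcond s).mpr hc, hc]
      · have : ¬ ((C.get? s).getD 0 ≠ 0) := fun h => hc ((hcond s).mp h)
        simp [this, hc]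
  have hmnd : members.Nodup := pv_stage_nodup.filter _
  have h2 : (members.foldl (fun d s => d.insert s (C.getD s 0)) PySem.Dict.empty).items
      = members.map (fun s => (s, C.getD s 0)) := by
    rw [PySem.Dict.items_foldl_insert_fresh members (fun s => s) (fun s => C.getD s 0)
      PySem.Dict.empty (by intro a _; rfl) (by simpa using hmnd)]
    rfl
  have hmcnd : (mc.map Prod.fst).Nodup := by
    have hp : mc.Perm C.items := by rw [hmc]; exact PySem.List.sorted_perm _ _ _
    exact ((hp.map Prod.fst).nodup_iff).mpr hk
  rw [h1, pv_skip_fold mc _ hmcnd, h2]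
  congr 1
  -- the skip test is membership in members, i.e. in STAGE_ORDER (keys of mc all in C)
  apply List.filter_congr
  intro p hp
  have hpk : p.1 ∈ C.keys := by
    have : p ∈ C.items := (PySem.List.mem_sorted _ _ _ _).mp (by rw [← hmc]; exact hp)
    exact List.mem_map_of_mem this
  have hkeys : (members.foldl (fun d s => d.insert s (C.getD s 0)) PySem.Dict.empty).keys
      = members := by
    have h3 := congrArg (List.map Prod.fst) h2
    simp only [List.map_map] at h3
    have h4 : (Prod.fst ∘ fun s => (s, C.getD s 0)) = fun s : String => s := rfl
    rw [h4, List.map_id'] at h3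
    exact h3
  rw [PySem.Dict.contains_eq_decide_mem_keys, hkeys]
  congr 1
  rw [decide_eq_decide]
  rw [hmem, List.mem_filter, PySem.Dict.contains_iff_mem_keys]
  tauto

lemma pv_B_order (C : PySem.Dict String Int) (hk : C.keys.Nodup) :
    ((PySem.List.sorted (PySem.List.enumerate C.items) pvRank false).foldl
        (fun d e => d.insert e.2.1 e.2.2) PySem.Dict.empty).items
      = (pvStageOrder.filter (fun s => C.contains s)).map (fun s => (s, C.getD s 0))
        ++ (PySem.List.sorted C.items (fun p => p.2) true).filter
            (fun p => !decide (p.1 ∈ pvStageOrder)) := by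
  have hnd : (C.items.map Prod.fst).Nodup := hk
  rw [pv_keyed_eq C hk]
  set dec : (String × Int) → Int × (String × Int) :=
    fun p => (((C.items.map Prod.fst).idxOf p.1 : Int), p) with hdec
  set mcD := PySem.List.sorted (PySem.List.enumerate C.items)
      (fun e => (toLex (-e.2.2, e.1) : Lex (Int × Int))) false with hmcD
  set members := pvStageOrder.filter (fun s => C.contains s) with hmem
  set ysA := members.map (fun s => (((C.items.map Prod.fst).idxOf s : Int), (s, C.getD s 0)))
    with hysA
  set ysB := mcD.filter (fun e => !decide (e.2.1 ∈ pvStageOrder)) with hysB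
  have hED : PySem.List.enumerate C.items = C.items.map dec := pv_enum_dec _ hnd
  -- keys of the final rebuild are distinct
  have hkA : ysA.map (fun e => e.2.1) = members := by
    rw [hysA, List.map_map]; exact List.map_id' members
  have hmcd21 : (mcD.map (fun e => e.2.1)).Nodup := by
    have hp : mcD.Perm (C.items.map dec) := by
      rw [hmcD, ← hED]; exact PySem.List.sorted_perm _ _ _
    have h1 : ((C.items.map dec).map (fun e => e.2.1)).Nodup := by
      rw [List.map_map]
      exact hnd
    exact ((hp.map (fun e => e.2.1)).nodup_iff).mpr h1
  have hkB : (ysB.map (fun e => e.2.1)).Nodup := by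
    rw [hysB]
    exact hmcd21.sublist (List.Sublist.map _ List.filter_sublist)
  have hdisj : ∀ a ∈ ysA.map (fun e => e.2.1), ∀ b ∈ ysB.map (fun e => e.2.1), a ≠ b := by
    intro a ha b hb
    rw [hkA, hmem] at ha
    have haS : a ∈ pvStageOrder := (List.mem_filter.mp ha).1
    rcases List.mem_map.mp hb with ⟨e, he, rfl⟩
    have hbS : e.2.1 ∉ pvStageOrder := by
      have := (List.mem_filter.mp (hysB ▸ he)).2; simpa using this
    intro hEq; exact hbS (hEq ▸ haS)
  have hknd : ((ysA ++ ysB).map (fun e => e.2.1)).Nodup := by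
    rw [List.map_append, List.nodup_append]
    refine ⟨hkA ▸ (pv_stage_nodup.filter _), hkB, ?_⟩
    intro a ha b hb
    exact hdisj a ha b hb
  rw [PySem.Dict.items_foldl_insert_fresh (ysA ++ ysB) (fun e => e.2.1) (fun e => e.2.2)
    PySem.Dict.empty (fun a _ => rfl) hknd]
  rw [show (PySem.Dict.empty : PySem.Dict String Int).items = [] from rfl,
    List.nil_append, List.map_append]
  congr 1
  · rw [hysA, List.map_map]; rfl
  · have h5 : ysB.map (fun e => ((e.2.1 : String), (e.2.2 : Int))) = ysB.map Prod.snd := by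
      apply List.map_congr_left; intro e _; rfl
    have h6 : mcD.map Prod.snd = PySem.List.sorted C.items (fun p => p.2) true := by
      rw [hmcD]; exact pv_sorted_dec _
    have h7 : List.map Prod.snd (List.filter (fun e : Int × (String × Int) =>
          !decide (e.2.1 ∈ pvStageOrder)) mcD)
        = List.filter (fun p : String × Int => !decide (p.1 ∈ pvStageOrder))
            (mcD.map Prod.snd) :=
      by exact (List.filter_map (f := Prod.snd)
        (p := fun q : String × Int => !decide (q.1 ∈ pvStageOrder)) (l := mcD)).symm
    rw [h5, hysB, h7, h6]


-- A's first-loop truthiness test on a Counter is just key membership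
lemma pv_cond (vals : List String) (s : String) :
    (((PySem.Dict.counter vals).get? s).getD 0 ≠ 0)
      ↔ (PySem.Dict.counter vals).contains s = true := by
  rw [← PySem.Dict.getD_eq_get?_getD, PySem.Dict.getD_counter, PySem.Dict.contains_counter]
  rw [List.contains_iff_mem, ← List.count_pos_iff]
  omega

-- ===== VERDICT (by name: the statement is the Claim_ definition above) =====
theorem count_stages_py_spec : Claim_equal_count_stages_py := by
  unfold Claim_equal_count_stages_py
  intro rows key _
  unfold Spec_count_stages_py count_stages_py count_stages_py_alt
  simp only []
  rw [pv_vals_A rows key, pv_counts_B rows key]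
  rw [pv_A_order (PySem.Dict.counter (pvVals rows key)) (PySem.Dict.nodup_keys_counter _)
      (pv_cond (pvVals rows key))]
  rw [pv_B_order (PySem.Dict.counter (pvVals rows key)) (PySem.Dict.nodup_keys_counter _)]
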